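-- pv_equiv track=rewrite | github.com/Skyline-9/budget | backend/app/services/import_service.py | _resolve_cashew_columns
-- ===== SOURCE A (Python) =====
-- from typing import Any, Dict, List, Optional, Tuple
--
-- def _resolve_cashew_columns(col_map: Dict[str, str]) -> Dict[str, Optional[str]]:
--     def pick(*keys: str) -> Optional[str]:
--         for k in keys:
--             if k in col_map:
--                 return col_map[k]
--         return None
--
--     # Known Cashew export headers (case/spacing-insensitive via normalization).
--     return {
--         "account": pick("account"),
--         "amount": pick("amount"),
--         "currency": pick("currency"),
--         "title": pick("title"),
--         "note": pick("note", "notes"),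
--         "date": pick("date", "notedate"),
--         "income": pick("income"),
--         "type": pick("type"),
--         "category_name": pick("categoryname", "category"),
--         "subcategory_name": pick("subcategoryname", "subcategory"),
--         "color": pick("color"),
--         "icon": pick("icon"),
--         "emoji": pick("emoji"),
--         "budget": pick("budget"),
--         "objective": pick("objective"),
--     }
-- ===== SOURCE B (Python) =====
-- from typing import Dict, Optional
--
-- # Inverted index: header key -> (output field, is_primary_candidate).
-- _KEY_TO_FIELD = {
--     "account": ("account", True),
--     "amount": ("amount", True),
--     "currency": ("currency", True),
--     "title": ("title", True),
--     "note": ("note", True),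
--     "notes": ("note", False),
--     "date": ("date", True),
--     "notedate": ("date", False),
--     "income": ("income", True),
--     "type": ("type", True),
--     "categoryname": ("category_name", True),
--     "category": ("category_name", False),
--     "subcategoryname": ("subcategory_name", True),
--     "subcategory": ("subcategory_name", False),
--     "color": ("color", True),
--     "icon": ("icon", True),
--     "emoji": ("emoji", True),
--     "budget": ("budget", True),
--     "objective": ("objective", True),
-- }
--
-- _FIELDS = [
--     "account", "amount", "currency", "title", "note", "date", "income",
--     "type", "category_name", "subcategory_name", "color", "icon", "emoji",
--     "budget", "objective",
-- ]
--
--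
-- def _resolve_cashew_columns(col_map: Dict[str, str]) -> Dict[str, Optional[str]]:
--     # One pass over the input: classify each header via the inverted index,
--     # collecting primary and fallback hits separately (first occurrence wins).
--     prim: Dict[str, str] = {}
--     sec: Dict[str, str] = {}
--     for k, v in col_map.items():
--         hit = _KEY_TO_FIELD.get(k)
--         if hit is not None:
--             field, is_primary = hit
--             (prim if is_primary else sec).setdefault(field, v)
--     return {f: (prim[f] if f in prim else sec.get(f)) for f in _FIELDS}
-- ===== Notes on version B (the rewrite author's own statement) =====
-- stated objective: alternative
-- what changed: Replaced A's 15 per-field pick() probes into col_map by an inverted key->field index traversed in ONE pass over col_map, collecting primary and fallback hits into two dicts and then assembling the result per field (primary wins, fallback else, None otherwise).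
import Mathlib
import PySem

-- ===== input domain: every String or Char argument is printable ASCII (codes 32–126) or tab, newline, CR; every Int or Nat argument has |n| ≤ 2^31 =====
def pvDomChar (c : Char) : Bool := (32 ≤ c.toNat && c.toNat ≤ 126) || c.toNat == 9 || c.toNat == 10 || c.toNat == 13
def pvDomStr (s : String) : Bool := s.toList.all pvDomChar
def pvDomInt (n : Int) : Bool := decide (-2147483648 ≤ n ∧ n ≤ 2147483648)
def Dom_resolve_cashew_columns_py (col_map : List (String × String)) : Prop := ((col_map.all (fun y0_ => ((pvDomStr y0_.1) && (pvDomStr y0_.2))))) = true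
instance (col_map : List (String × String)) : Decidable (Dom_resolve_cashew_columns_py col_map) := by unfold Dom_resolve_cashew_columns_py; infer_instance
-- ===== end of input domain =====

-- B inverts A's traversal: one pass over col_map classifying each header through a
-- key→field index into primary/fallback hit dicts, instead of 15 per-field pick() probes;
-- objective: alternative.

-- ===== PORT A =====
-- pick(*keys): for k in keys: if k in col_map: return col_map[k]; return None
def pickA (col_map : List (String × String)) : List String → Option String
  | [] => none
  | k :: rest =>
    if (PySem.Dict.mk col_map).contains k then (PySem.Dict.mk col_map).get? k
    else pickA col_map rest

def resolve_cashew_columns_py (col_map : List (String × String)) : List (String × Option String) :=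
  [ ("account", pickA col_map ["account"]),
    ("amount", pickA col_map ["amount"]),
    ("currency", pickA col_map ["currency"]),
    ("title", pickA col_map ["title"]),
    ("note", pickA col_map ["note", "notes"]),
    ("date", pickA col_map ["date", "notedate"]),
    ("income", pickA col_map ["income"]),
    ("type", pickA col_map ["type"]),
    ("category_name", pickA col_map ["categoryname", "category"]),
    ("subcategory_name", pickA col_map ["subcategoryname", "subcategory"]),
    ("color", pickA col_map ["color"]),
    ("icon", pickA col_map ["icon"]),
    ("emoji", pickA col_map ["emoji"]),
    ("budget", pickA col_map ["budget"]),
    ("objective", pickA col_map ["objective"]) ]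

-- ===== PORT B =====
-- Inverted index: header key -> (output field, is_primary_candidate)
def cashewKeyTable : PySem.Dict String (String × Bool) := PySem.Dict.mk
  [ ("account", ("account", true)),
    ("amount", ("amount", true)),
    ("currency", ("currency", true)),
    ("title", ("title", true)),
    ("note", ("note", true)),
    ("notes", ("note", false)),
    ("date", ("date", true)),
    ("notedate", ("date", false)),
    ("income", ("income", true)),
    ("type", ("type", true)),
    ("categoryname", ("category_name", true)),
    ("category", ("category_name", false)),
    ("subcategoryname", ("subcategory_name", true)),
    ("subcategory", ("subcategory_name", false)),
    ("color", ("color", true)),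
    ("icon", ("icon", true)),
    ("emoji", ("emoji", true)),
    ("budget", ("budget", true)),
    ("objective", ("objective", true)) ]

def cashewFields : List String :=
  [ "account", "amount", "currency", "title", "note", "date", "income",
    "type", "category_name", "subcategory_name", "color", "icon", "emoji",
    "budget", "objective" ]

-- one pass: (prim, sec).setdefault per classified header (first occurrence wins)
def cashewStep (st : PySem.Dict String String × PySem.Dict String String)
    (kv : String × String) : PySem.Dict String String × PySem.Dict String String :=
  match cashewKeyTable.get? kv.1 with
  | some (field, isPrimary) =>
      if isPrimary then (st.1.setdefault field kv.2, st.2)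
      else (st.1, st.2.setdefault field kv.2)
  | none => st

def resolve_cashew_columns_py_alt (col_map : List (String × String)) : List (String × Option String) :=
  let st := col_map.foldl cashewStep (PySem.Dict.empty, PySem.Dict.empty)
  cashewFields.map (fun f => (f, match st.1.get? f with
    | some v => some v
    | none => st.2.get? f))

-- ===== PRECONDITION & SPEC =====
def Spec_resolve_cashew_columns_py (col_map : List (String × String)) (out : List (String × Option String)) : Prop := out = resolve_cashew_columns_py_alt col_map
instance (col_map : List (String × String)) (out : List (String × Option String)) : Decidable (Spec_resolve_cashew_columns_py col_map out) := by unfold Spec_resolve_cashew_columns_py; infer_instance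

-- ===== CLAIM (what is proved, stated in full; the proofs are below) =====
def Claim_equal_resolve_cashew_columns_py : Prop := ∀ (col_map : List (String × String)), Dom_resolve_cashew_columns_py col_map → Spec_resolve_cashew_columns_py col_map (resolve_cashew_columns_py col_map)

-- ===== LEMMAS AND PROOFS =====

-- pick over a cons of candidate keys is first-match orElse
theorem pickA_cons (col_map : List (String × String)) (k : String) (ks : List String) :
    pickA col_map (k :: ks) =
      ((PySem.Dict.mk col_map).get? k).orElse (fun _ => pickA col_map ks) := by
  simp only [pickA]
  cases hg : (PySem.Dict.mk col_map).get? k with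
  | none =>
    have h : (PySem.Dict.mk col_map).contains k = false := by
      rw [PySem.Dict.contains_eq_isSome_get?, hg]; rfl
    simp [h, Option.orElse]
  | some v =>
    have h : (PySem.Dict.mk col_map).contains k = true := by
      rw [PySem.Dict.contains_eq_isSome_get?, hg]; rfl
    simp [h, Option.orElse]

-- setdefault at another key leaves a lookup unchanged
theorem get?_setdefault_ne (d : PySem.Dict String String) (k k' : String) (v : String)
    (h : k' ≠ k) : (d.setdefault k v).get? k' = d.get? k' := by
  cases hc : d.contains k with
  | true => rw [PySem.Dict.setdefault_of_contains d v hc]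
  | false =>
    rw [PySem.Dict.setdefault_of_not_contains d v hc,
        PySem.Dict.get?_insert_of_ne d v h]

-- what one step does to the projection of each side at a field f
theorem cashewStep_proj (st : PySem.Dict String String × PySem.Dict String String)
    (kv : String × String) (f : String) :
    ((cashewStep st kv).1.get? f =
        (if cashewKeyTable.get? kv.1 = some (f, true)
          then (st.1.get? f).orElse (fun _ => some kv.2) else st.1.get? f)) ∧
    ((cashewStep st kv).2.get? f =
        (if cashewKeyTable.get? kv.1 = some (f, false)
          then (st.2.get? f).orElse (fun _ => some kv.2) else st.2.get? f)) := by
  unfold cashewStep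
  cases hg : cashewKeyTable.get? kv.1 with
  | none => simp
  | some p =>
    obtain ⟨f', b⟩ := p
    by_cases hf : f' = f
    · subst hf
      cases b with
      | true =>
        constructor
        · simp only [↓reduceIte, PySem.Dict.get?_setdefault_self]
          cases st.1.get? f' <;> rfl
        · simp only [↓reduceIte, if_neg (show ¬(some (f', true) = some (f', false)) by simp)]
      | false =>
        constructor
        · simp only [if_neg (show ¬(false = true) by decide), if_neg (show ¬(some (f', false) = some (f', true)) by simp)]
        · simp only [if_neg (show ¬(false = true) by decide), PySem.Dict.get?_setdefault_self]
          cases st.2.get? f' <;> rfl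
    · cases b with
      | true =>
        constructor
        · simp only [↓reduceIte, if_neg (show ¬(some (f', true) = some (f, true)) by simp [hf])]
          exact get?_setdefault_ne st.1 f' f kv.2 (fun h => hf h.symm)
        · simp only [↓reduceIte, if_neg (show ¬(some (f', true) = some (f, false)) by simp)]
      | false =>
        constructor
        · simp only [if_neg (show ¬(false = true) by decide), if_neg (show ¬(some (f', false) = some (f, true)) by simp)]
        · simp only [if_neg (show ¬(false = true) by decide), if_neg (show ¬(some (f', false) = some (f, false)) by simp [hf])]
          exact get?_setdefault_ne st.2 f' f kv.2 (fun h => hf h.symm)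

-- the first primary / secondary hit for field f in the raw list
def primScan (f : String) (l : List (String × String)) : Option String :=
  l.findSome? (fun kv => if cashewKeyTable.get? kv.1 = some (f, true) then some kv.2 else none)

def secScan (f : String) (l : List (String × String)) : Option String :=
  l.findSome? (fun kv => if cashewKeyTable.get? kv.1 = some (f, false) then some kv.2 else none)

theorem fold_proj (f : String) (l : List (String × String))
    (st : PySem.Dict String String × PySem.Dict String String) :
    ((l.foldl cashewStep st).1.get? f = (st.1.get? f).orElse (fun _ => primScan f l)) ∧
    ((l.foldl cashewStep st).2.get? f = (st.2.get? f).orElse (fun _ => secScan f l)) := by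
  induction l generalizing st with
  | nil =>
    constructor
    · simp only [List.foldl_nil, primScan, List.findSome?_nil]
      cases st.1.get? f <;> rfl
    · simp only [List.foldl_nil, secScan, List.findSome?_nil]
      cases st.2.get? f <;> rfl
  | cons kv l ih =>
    have hstep := cashewStep_proj st kv f
    have ihs := ih (cashewStep st kv)
    constructor
    · rw [List.foldl_cons, ihs.1, hstep.1]
      simp only [primScan, List.findSome?]
      by_cases h : cashewKeyTable.get? kv.1 = some (f, true)
      · simp only [h, if_true]
        cases st.1.get? f <;> rfl
      · simp only [if_neg h]
    · rw [List.foldl_cons, ihs.2, hstep.2]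
      simp only [secScan, List.findSome?]
      by_cases h : cashewKeyTable.get? kv.1 = some (f, false)
      · simp only [h, if_true]
        cases st.2.get? f <;> rfl
      · simp only [if_neg h]

-- scans reduce to first-match dict lookups once the field's keys are identified
theorem primScan_eq (f k1 : String)
    (hf : ∀ k, cashewKeyTable.get? k = some (f, true) ↔ k = k1)
    (l : List (String × String)) :
    primScan f l = (PySem.Dict.mk l).get? k1 := by
  induction l with
  | nil => rfl
  | cons kv l ih =>
    obtain ⟨k, v⟩ := kv
    simp only [primScan, List.findSome?] at *
    rw [PySem.Dict.get?_mk_cons]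
    by_cases h : k = k1
    · subst h
      simp [(hf k).mpr rfl]
    · have : ¬ cashewKeyTable.get? k = some (f, true) := fun hc => h ((hf k).mp hc)
      simp [this, h, ih]

theorem secScan_eq (f k2 : String)
    (hf : ∀ k, cashewKeyTable.get? k = some (f, false) ↔ k = k2)
    (l : List (String × String)) :
    secScan f l = (PySem.Dict.mk l).get? k2 := by
  induction l with
  | nil => rfl
  | cons kv l ih =>
    obtain ⟨k, v⟩ := kv
    simp only [secScan, List.findSome?] at *
    rw [PySem.Dict.get?_mk_cons]
    by_cases h : k = k2
    · subst h
      simp [(hf k).mpr rfl]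
    · have : ¬ cashewKeyTable.get? k = some (f, false) := fun hc => h ((hf k).mp hc)
      simp [this, h, ih]

theorem secScan_none (f : String)
    (hf : ∀ k, ¬ cashewKeyTable.get? k = some (f, false))
    (l : List (String × String)) :
    secScan f l = none := by
  induction l with
  | nil => rfl
  | cons kv l ih =>
    simp only [secScan, List.findSome?] at *
    simp [hf kv.1, ih]

-- identify the keys through membership in the concrete table
theorem table_hit_iff (k : String) (f : String) (b : Bool) :
    cashewKeyTable.get? k = some (f, b) ↔ (k, (f, b)) ∈
      [ ("account", ("account", true)), ("amount", ("amount", true)),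
        ("currency", ("currency", true)), ("title", ("title", true)),
        ("note", ("note", true)), ("notes", ("note", false)),
        ("date", ("date", true)), ("notedate", ("date", false)),
        ("income", ("income", true)), ("type", ("type", true)),
        ("categoryname", ("category_name", true)), ("category", ("category_name", false)),
        ("subcategoryname", ("subcategory_name", true)), ("subcategory", ("subcategory_name", false)),
        ("color", ("color", true)), ("icon", ("icon", true)),
        ("emoji", ("emoji", true)), ("budget", ("budget", true)),
        ("objective", ("objective", true)) ] := by
  exact PySem.Dict.get?_eq_some_iff_mem_items cashewKeyTable (by decide) (k := k) (v := (f, b))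

-- per-field value of B's pass = A's pick
theorem field_val (col_map : List (String × String)) (f : String) :
    (match (col_map.foldl cashewStep (PySem.Dict.empty, PySem.Dict.empty)).1.get? f with
      | some v => some v
      | none => (col_map.foldl cashewStep (PySem.Dict.empty, PySem.Dict.empty)).2.get? f)
    = (primScan f col_map).orElse (fun _ => secScan f col_map) := by
  have h := fold_proj f col_map (PySem.Dict.empty, PySem.Dict.empty)
  rw [h.1, h.2]
  simp only [PySem.Dict.get?_empty]
  cases primScan f col_map <;> cases secScan f col_map <;> rfl

-- ===== VERDICT (by name: the statement is the Claim_ definition above) =====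
theorem resolve_cashew_columns_py_spec : Claim_equal_resolve_cashew_columns_py := by
  intro col_map _
  unfold Spec_resolve_cashew_columns_py resolve_cashew_columns_py resolve_cashew_columns_py_alt
  simp only [cashewFields, List.map]
  -- reduce each of the 15 entries
  have hv : ∀ (f k1 k2 : String),
      (∀ k, cashewKeyTable.get? k = some (f, true) ↔ k = k1) →
      (∀ k, cashewKeyTable.get? k = some (f, false) ↔ k = k2) →
      (match (col_map.foldl cashewStep (PySem.Dict.empty, PySem.Dict.empty)).1.get? f with
        | some v => some v
        | none => (col_map.foldl cashewStep (PySem.Dict.empty, PySem.Dict.empty)).2.get? f)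
      = pickA col_map [k1, k2] := by
    intro f k1 k2 h1 h2
    rw [field_val, primScan_eq f k1 h1, secScan_eq f k2 h2, pickA_cons, pickA_cons]
    cases (PySem.Dict.mk col_map).get? k1 <;> cases (PySem.Dict.mk col_map).get? k2 <;> rfl
  have hv1 : ∀ (f k1 : String),
      (∀ k, cashewKeyTable.get? k = some (f, true) ↔ k = k1) →
      (∀ k, ¬ cashewKeyTable.get? k = some (f, false)) →
      (match (col_map.foldl cashewStep (PySem.Dict.empty, PySem.Dict.empty)).1.get? f with
        | some v => some v
        | none => (col_map.foldl cashewStep (PySem.Dict.empty, PySem.Dict.empty)).2.get? f)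
      = pickA col_map [k1] := by
    intro f k1 h1 h2
    rw [field_val, primScan_eq f k1 h1, secScan_none f h2, pickA_cons]
    cases (PySem.Dict.mk col_map).get? k1 <;> rfl
  simp only [List.cons.injEq, Prod.mk.injEq, and_true, true_and]
  refine ⟨?_, ?_, ?_, ?_, ?_, ?_, ?_, ?_, ?_, ?_, ?_, ?_, ?_, ?_, ?_⟩ <;>
    first
      | exact (hv1 _ _ (fun k => by rw [table_hit_iff]; simp)
          (fun k => by rw [table_hit_iff]; simp)).symm
      | exact (hv _ _ _ (fun k => by rw [table_hit_iff]; simp)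
          (fun k => by rw [table_hit_iff]; simp)).symm
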